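-- pv_equiv track=rewrite | github.com/oigomezz/Retos | Hackerearth/Algorithms/Sorting/Merge-Sort/Maximum-Length-Subsequence/solution.py | solve
-- ===== SOURCE A (Python) =====
-- def solve(n, arr):
--     arr.sort()
--     start = arr[0]
--     max_len = cnt = j = 1
--     for i in range(1, n):
--         diff = arr[i] - start
--         if diff <= 10:
--             cnt += 1
--         else:
--             max_len = max(max_len, cnt)
--             start = arr[j]
--             j += 1
--     max_len = max(max_len, cnt)
--     return max_len
-- ===== SOURCE B (Python) =====
-- def _bisect_left(a, x, lo, hi):
--     while lo < hi:
--         mid = (lo + hi) // 2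
--         if a[mid] < x:
--             lo = mid + 1
--         else:
--             hi = mid
--     return lo
--
--
-- def solve(n, arr):
--     arr.sort()
--     best = 1
--     for i in range(1, n):
--         j = _bisect_left(arr, arr[i] - 10, 0, i)
--         best = max(best, i - j + 1)
--     return best
-- ===== Notes on version B (the rewrite author's own statement) =====
-- stated objective: alternative
-- what changed: A's incremental left-pointer/counter scan over the sorted array is replaced by a per-right-index binary search (hand-rolled bisect_left, since A imports nothing) for the window start, taking the max of i-j+1.
import Mathlib
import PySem

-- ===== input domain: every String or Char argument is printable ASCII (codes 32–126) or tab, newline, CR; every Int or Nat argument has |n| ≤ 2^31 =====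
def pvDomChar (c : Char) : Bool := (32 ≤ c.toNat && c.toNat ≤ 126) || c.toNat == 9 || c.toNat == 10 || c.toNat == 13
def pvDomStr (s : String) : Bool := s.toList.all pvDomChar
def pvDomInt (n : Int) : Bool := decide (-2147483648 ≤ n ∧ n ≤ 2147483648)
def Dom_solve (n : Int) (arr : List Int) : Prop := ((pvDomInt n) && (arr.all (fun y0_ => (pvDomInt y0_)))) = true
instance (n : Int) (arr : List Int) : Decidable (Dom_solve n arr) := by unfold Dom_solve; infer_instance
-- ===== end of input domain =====

-- B replaces A's incremental left-pointer/counter scan with a per-index binary search over the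
-- sorted array (an alternative of similar cost, dominated by the sort). Both A and B sort arr in
-- place in Python (identical side effect); the equivalence proved here is about the return value.

-- ===== PORT A =====
-- loop body of A's 'for i in range(1, n)'; state = (start, max_len, cnt, j)
def stepA (s : List Int) : (Int × Int × Int × Int) → Int → (Int × Int × Int × Int) :=
  fun st i =>
    if PySem.List.pyGetD s i 0 - st.1 ≤ 10 then (st.1, st.2.1, st.2.2.1 + 1, st.2.2.2)
    else (PySem.List.pyGetD s st.2.2.2 0, max st.2.1 st.2.2.1, st.2.2.1, st.2.2.2 + 1)

def solve (n : Int) (arr : List Int) : Int :=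
  let s := PySem.List.sorted arr (fun x => x)          -- arr.sort()
  let r := (PySem.List.pyRange 1 n 1).foldl (stepA s) (PySem.List.pyGetD s 0 0, 1, 1, 1)
  max r.2.1 r.2.2.1                                    -- max(max_len, cnt)

-- ===== PORT B =====
-- hand-written _bisect_left from Source B (A imports no module, so Source B may not import bisect);
-- its indices are nonnegative at every call, ported as Nat; a[mid] is in range at every call.
def blAux (s : List Int) (x : Int) (lo hi : Nat) : Nat :=
  if lo < hi then
    let mid := (lo + hi) / 2
    if s.getD mid 0 < x then blAux s x (mid + 1) hi else blAux s x lo mid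
  else lo
termination_by hi - lo
decreasing_by all_goals omega

-- loop body of B's 'for i in range(1, n)'; best = running maximum
def stepB (s : List Int) : Int → Int → Int :=
  fun best i =>
    let j := blAux s (PySem.List.pyGetD s i 0 - 10) 0 i.toNat
    max best (i - (j : Int) + 1)

def solve_alt (n : Int) (arr : List Int) : Int :=
  let s := PySem.List.sorted arr (fun x => x)          -- arr.sort()
  (PySem.List.pyRange 1 n 1).foldl (stepB s) 1

-- ===== PRECONDITION & SPEC =====
-- A raises IndexError on arr = [] (at arr[0]) and whenever n > len(arr) (at arr[i]); Pre_ excludes exactly those.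
def Pre_solve (n : Int) (arr : List Int) : Prop := arr ≠ [] ∧ n ≤ (arr.length : Int)
instance (n : Int) (arr : List Int) : Decidable (Pre_solve n arr) := by unfold Pre_solve; infer_instance
def pvWitness_solve : Int × List Int := (3, [1, 20, 3])

def Spec_solve (n : Int) (arr : List Int) (out : Int) : Prop := out = solve_alt n arr
instance (n : Int) (arr : List Int) (out : Int) : Decidable (Spec_solve n arr out) := by unfold Spec_solve; infer_instance

-- ===== CLAIM (what is proved, stated in full; the proofs are below) =====
def Claim_equal_solve : Prop := ∀ (n : Int) (arr : List Int), Dom_solve n arr → Pre_solve n arr → Spec_solve n arr (solve n arr)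

-- ===== LEMMAS AND PROOFS =====

-- a Pairwise-(≤) list has monotone getD on in-range indices
lemma getD_mono (s : List Int) (hs : s.Pairwise (· ≤ ·)) {p q : Nat} (hpq : p ≤ q)
    (hq : q < s.length) : s.getD p 0 ≤ s.getD q 0 := by
  rcases Nat.lt_or_ge p q with h | h
  · rw [List.getD_eq_getElem _ _ (by omega), List.getD_eq_getElem _ _ hq]
    exact List.pairwise_iff_getElem.mp hs p q (by omega) hq h
  · have : p = q := by omega
    subst this; exact le_refl _

-- characterisation of the hand-rolled bisect_left on a sorted list
lemma blAux_spec (s : List Int) (x : Int) (lo hi : Nat) (hs : s.Pairwise (· ≤ ·))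
    (hlo : lo ≤ hi) (hhi : hi ≤ s.length) :
    lo ≤ blAux s x lo hi ∧ blAux s x lo hi ≤ hi ∧
    (∀ k, lo ≤ k → k < blAux s x lo hi → s.getD k 0 < x) ∧
    (∀ k, blAux s x lo hi ≤ k → k < hi → x ≤ s.getD k 0) := by
  induction lo, hi using blAux.induct s x with
  | case1 lo hi h mid hlt ih =>
    have hmeq : (lo + hi) / 2 = mid := rfl
    rw [blAux]
    simp only [if_pos h, hmeq]
    have hmid : lo ≤ mid ∧ mid < hi := by constructor <;> omega
    rw [if_pos hlt]
    obtain ⟨a1, a2, a3, a4⟩ := ih (by omega) hhi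
    refine ⟨by omega, a2, ?_, a4⟩
    intro k hk1 hk2
    rcases Nat.lt_or_ge k (mid + 1) with h2 | h2
    · exact lt_of_le_of_lt (getD_mono s hs (show k ≤ mid by omega) (by omega)) hlt
    · exact a3 k h2 hk2
  | case2 lo hi h mid hge ih =>
    have hmeq : (lo + hi) / 2 = mid := rfl
    rw [blAux]
    simp only [if_pos h, hmeq]
    have hmid : lo ≤ mid ∧ mid < hi := by constructor <;> omega
    rw [if_neg hge]
    obtain ⟨a1, a2, a3, a4⟩ := ih (by omega) (by omega)
    refine ⟨a1, by omega, a3, ?_⟩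
    intro k hk1 hk2
    rcases Nat.lt_or_ge k mid with h2 | h2
    · exact a4 k hk1 h2
    · exact le_trans (not_lt.mp hge) (getD_mono s hs h2 (by omega))
  | case3 lo hi h =>
    rw [blAux]
    simp only [if_neg h]
    exact ⟨le_refl _, by omega, by omega, by omega⟩

-- main loop invariant: after processing i = 1..m, A's state is determined by a left index jn,
-- cnt = m - jn + 1 equals B's running maximum, max_len ≤ cnt, and everything left of jn is > 10 below s[m]
lemma loop_inv (s : List Int) (hs : s.Pairwise (· ≤ ·)) (m : Nat) (hm : m < s.length) :
    ∃ (jn : Nat) (ml : Int),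
      (PySem.List.pyRange 1 ((m : Int) + 1) 1).foldl (stepA s) (PySem.List.pyGetD s 0 0, 1, 1, 1)
        = (s.getD jn 0, ml, (m : Int) - (jn : Int) + 1, (jn : Int) + 1) ∧
      jn ≤ m ∧ ml ≤ (m : Int) - (jn : Int) + 1 ∧
      (∀ k, k < jn → s.getD m 0 - s.getD k 0 > 10) ∧
      (PySem.List.pyRange 1 ((m : Int) + 1) 1).foldl (stepB s) 1 = (m : Int) - (jn : Int) + 1 := by
  induction m with
  | zero =>
    refine ⟨0, 1, ?_, by omega, by omega, by omega, ?_⟩ <;>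
      simp [PySem.List.pyRange_one_eq_nil (by omega : (1:Int) ≥ 1), PySem.List.pyGetD_zero]
  | succ m ih =>
    have hm' : m < s.length := by omega
    obtain ⟨jn, ml, hA, hj, hml, hI2, hB⟩ := ih hm'
    have hcast : (((m+1 : Nat) : Int) + 1) = ((m : Int) + 1) + 1 := by push_cast; ring
    have hsplit : PySem.List.pyRange 1 (((m+1 : Nat) : Int) + 1) 1
        = PySem.List.pyRange 1 ((m : Int) + 1) 1 ++ [(m : Int) + 1] := by
      rw [hcast, PySem.List.pyRange_one_succ_right (by omega)]
    have hcast2 : ((m : Int) + 1) = ((m+1 : Nat) : Int) := by push_cast; ring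
    -- bisect characterisation at index m+1
    obtain ⟨b1, b2, b3, b4⟩ := blAux_spec s (s.getD (m+1) 0 - 10) 0 (m+1) hs (by omega) (by omega)
    set r := blAux s (s.getD (m+1) 0 - 10) 0 (m+1) with hr
    have hgm : s.getD m 0 ≤ s.getD (m+1) 0 := getD_mono s hs (by omega) (by omega)
    rw [hsplit, List.foldl_append, List.foldl_append, hA, hB]
    simp only [List.foldl_cons, List.foldl_nil, stepA, stepB]
    rw [hcast2, PySem.List.pyGetD_natCast]
    by_cases hc : s.getD (m+1) 0 - s.getD jn 0 ≤ 10
    · -- window extends: the bisect index equals A's left pointer jn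
      have hrjn : r = jn := by
        rcases Nat.lt_trichotomy r jn with h | h | h
        · have := b4 r (le_refl r) (by omega)
          have := hI2 r h
          omega
        · exact h
        · have := b3 jn (by omega) h
          omega
      refine ⟨jn, ml, ?_, by omega, by omega, ?_, ?_⟩
      · simp only [if_pos hc]
        refine Prod.ext rfl (Prod.ext rfl (Prod.ext ?_ ?_)) <;> simp <;> push_cast <;> ring
      · intro k hk
        have := hI2 k hk
        omega
      · simp only [hcast2] at *
        rw [Int.toNat_natCast]
        rw [← hr, hrjn]
        push_cast
        omega
    · -- window slides: the bisect index is ≥ jn + 1, so B's candidate cannot beat cnt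
      have hrge : jn + 1 ≤ r := by
        by_contra h
        have := b4 jn (by omega) (by omega)
        omega
      refine ⟨jn + 1, max ml ((m : Int) - (jn : Int) + 1), ?_, by omega, ?_, ?_, ?_⟩
      · simp only [if_neg hc]
        have : ((jn : Int) + 1) = ((jn + 1 : Nat) : Int) := by push_cast; ring
        rw [this, PySem.List.pyGetD_natCast]
        refine Prod.ext rfl (Prod.ext rfl (Prod.ext ?_ ?_)) <;> simp <;> push_cast <;> ring
      · push_cast; omega
      · intro k hk
        rcases Nat.lt_or_ge k jn with h | h
        · have := hI2 k h; omega
        · have : k = jn := by omega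
          subst this; omega
      · simp only [hcast2] at *
        rw [Int.toNat_natCast, ← hr]
        have hri : ((jn : Int) + 1) ≤ (r : Int) := by exact_mod_cast hrge
        push_cast
        omega

-- ===== VERDICT (by name: the statement is the Claim_ definition above) =====
theorem solve_spec : Claim_equal_solve := by
  intro n arr _hdom hpre
  unfold Spec_solve
  simp only [solve, solve_alt]
  have hs : (PySem.List.sorted arr (fun x => x)).Pairwise (· ≤ ·) :=
    PySem.List.sorted_pairwise arr (fun x => x)
  have hlen : (PySem.List.sorted arr (fun x => x)).length = arr.length :=
    PySem.List.length_sorted arr (fun x => x) false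
  set s := PySem.List.sorted arr (fun x => x) with hsdef
  by_cases hn : n ≤ 1
  · rw [PySem.List.pyRange_one_eq_nil (by omega)]
    simp
  · have h2 := hpre.2
    have hmlt : (n - 1).toNat < s.length := by omega
    obtain ⟨jn, ml, hA, hj, hml, hI2, hB⟩ := loop_inv s hs (n - 1).toNat hmlt
    rw [show n = (((n - 1).toNat : Int) + 1) by omega, hA, hB]
    simp
    omega
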